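-- pv_equiv track=rewrite | github.com/josephmccrae-utsa/TIP101 | Unit 3/S2 PS/p4_longest_uniform_substring.py | longest_uniform_substring
-- ===== SOURCE A (Python) =====
-- def longest_uniform_substring(s):
--     length = 0
--     dict = {}
--     for char in s:
--         if char not in dict:
--             dict[char] = 1
--         else:
--             dict[char] += 1
--
--     for value in dict.values():
--         if value > length:
--             length = value
--     return length
--
--
--     pass
-- ===== SOURCE B (Python) =====
-- def longest_uniform_substring(s):
--     length = 0
--     run = 0
--     prev = None
--     for c in sorted(s):
--         if prev is not None and c == prev:
--             run += 1
--         else: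
--             run = 1
--         if run > length:
--             length = run
--         prev = c
--     return length
-- ===== Notes on version B (the rewrite author's own statement) =====
-- stated objective: alternative
-- what changed: B builds no frequency table at all: it sorts the characters so equal characters become adjacent and finds the longest run in one scan with a run counter, trading A's dict-counting two-pass O(n) for a sort-and-scan O(n log n).
import Mathlib
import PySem

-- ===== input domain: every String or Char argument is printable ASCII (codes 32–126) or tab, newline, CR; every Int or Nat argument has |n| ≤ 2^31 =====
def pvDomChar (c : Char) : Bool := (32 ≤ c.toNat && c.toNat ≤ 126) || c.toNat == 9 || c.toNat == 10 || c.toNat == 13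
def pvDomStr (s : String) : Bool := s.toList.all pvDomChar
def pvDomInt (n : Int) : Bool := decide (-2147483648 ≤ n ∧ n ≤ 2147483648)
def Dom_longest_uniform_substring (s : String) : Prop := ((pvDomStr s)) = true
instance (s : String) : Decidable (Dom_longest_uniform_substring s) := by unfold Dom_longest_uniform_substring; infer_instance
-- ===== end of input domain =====

-- B builds no frequency table: it sorts the characters and finds the longest run of equal
-- adjacent characters in one scan (alternative algorithm, not claimed faster).

-- ===== PORT A =====
def longest_uniform_substring (s : String) : Int :=
  let d : PySem.Dict Char Int :=
    s.toList.foldl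
      (fun d c =>
        if d.contains c = false then d.insert c 1
        else d.insert c (d.getD c 0 + 1))
      PySem.Dict.empty
  d.values.foldl (fun length v => if v > length then v else length) 0

-- ===== PORT B =====
-- one step of B's loop body: state is (length, run, prev)
def lusRunStep (st : Int × Int × Option Char) (c : Char) : Int × Int × Option Char :=
  let (length, run, prev) := st
  let run := if prev = some c then run + 1 else 1
  let length := if run > length then run else length
  (length, run, some c)

def longest_uniform_substring_alt (s : String) : Int :=
  ((PySem.List.sorted s.toList (fun c => c) false).foldl lusRunStep (0, 0, none)).1

-- ===== PRECONDITION & SPEC =====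
def Spec_longest_uniform_substring (s : String) (out : Int) : Prop := out = longest_uniform_substring_alt s
instance (s : String) (out : Int) : Decidable (Spec_longest_uniform_substring s out) := by unfold Spec_longest_uniform_substring; infer_instance

-- ===== CLAIM (what is proved, stated in full; the proofs are below) =====
def Claim_equal_longest_uniform_substring : Prop := ∀ (s : String), Dom_longest_uniform_substring s → Spec_longest_uniform_substring s (longest_uniform_substring s)

-- ===== LEMMAS AND PROOFS =====

-- A's insert loop is exactly collections.Counter's modify step.
lemma dict_step_eq_modify (d : PySem.Dict Char Int) (c : Char) :
    (if d.contains c = false then d.insert c 1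
     else d.insert c (d.getD c 0 + 1)) = d.modify c 0 (· + 1) := by
  cases h : d.contains c with
  | false => simp [PySem.Dict.modify, PySem.Dict.getD_of_not_contains _ _ h]
  | true => simp [PySem.Dict.modify]

-- A's running-max-with-if loop is a fold of max.
lemma foldl_if_gt_eq_foldl_max (l : List Int) (init : Int) :
    l.foldl (fun length v => if v > length then v else length) init
      = l.foldl max init := by
  apply PySem.List.foldl_congr_mem
  intro acc x _
  by_cases h : x > acc
  · simp [h, max_eq_right (le_of_lt h)]
  · simp [h, max_eq_left (le_of_not_gt h)]

-- A computes the fold of max over the counts of the distinct characters.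
lemma portA_eq_max_set_counts (s : String) :
    longest_uniform_substring s
      = ((PySem.Set.ofList s.toList).map (fun k => (s.toList.count k : Int))).foldl max 0 := by
  unfold longest_uniform_substring
  have hd : s.toList.foldl
      (fun d c =>
        if d.contains c = false then d.insert c 1
        else d.insert c (d.getD c 0 + 1))
      PySem.Dict.empty = PySem.Dict.counter s.toList := by
    rw [PySem.Dict.counter_eq_foldl]
    apply PySem.List.foldl_congr_mem
    intro d c _
    exact dict_step_eq_modify d c
  simp only [hd, foldl_if_gt_eq_foldl_max, PySem.Dict.values, PySem.Dict.items_counter,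
    List.map_map, Function.comp_def]

-- pulling a max out of a foldl max accumulator
lemma foldl_max_comm (L : List Int) : ∀ (a x : Int),
    L.foldl max (max a x) = max (L.foldl max a) x := by
  induction L with
  | nil => intro a x; rfl
  | cons y L ih =>
    intro a x
    simp only [List.foldl_cons]
    rw [show max (max a x) y = max (max a y) x by
      rw [max_right_comm], ih]

lemma init_le_foldl_max (L : List Int) : ∀ (a : Int), a ≤ L.foldl max a := by
  induction L with
  | nil => intro a; exact le_refl a
  | cons y L ih =>
    intro a
    exact le_trans (le_max_left a y) (ih _)

lemma le_foldl_max (L : List Int) : ∀ (a x : Int), x ∈ L → x ≤ L.foldl max a := by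
  induction L with
  | nil => intro a x h; cases h
  | cons y L ih =>
    intro a x h
    rcases List.mem_cons.1 h with rfl | h
    · exact le_trans (le_max_right a x) (init_le_foldl_max L _)
    · exact ih _ _ h

-- an accumulator bump below some listed value is absorbed by the fold of max
lemma foldl_max_absorb (L : List Char) (g : Char → Int) (len x : Int) (c : Char)
    (hc : c ∈ L) (hx : x ≤ g c) :
    (L.map g).foldl max (max len x) = (L.map g).foldl max len := by
  rw [foldl_max_comm,
    max_eq_left (le_trans hx (le_foldl_max _ _ _ (List.mem_map_of_mem hc)))]

-- core run lemma: mid-run state over a sorted tail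
lemma run_main (l : List Char) :
    l.Pairwise (· ≤ ·) → ∀ (len run : Int) (p : Char),
    (∀ x ∈ l, p ≤ x) → run ≤ len →
    (l.foldl lusRunStep (len, run, some p)).1
      = (l.dedup.map (fun c => ((l.count c : Int) + if c = p then run else 0))).foldl max len := by
  induction l with
  | nil => intro _ len run p _ _; simp
  | cons c t ih =>
    intro hpw len run p hle hrl
    have hpw' : t.Pairwise (· ≤ ·) := (List.pairwise_cons.1 hpw).2
    have hhead : ∀ x ∈ t, c ≤ x := (List.pairwise_cons.1 hpw).1
    by_cases hcp : c = p
    · subst hcp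
      have hstep : lusRunStep (len, run, some c) c = (max len (run + 1), run + 1, some c) := by
        simp only [lusRunStep]
        rw [max_def]; split_ifs <;> simp <;> omega
      rw [List.foldl_cons, hstep,
        ih hpw' (max len (run + 1)) (run + 1) c hhead (le_max_right _ _)]
      by_cases hc : c ∈ t
      · rw [List.dedup_cons_of_mem hc]
        have hmap : t.dedup.map (fun x => ((t.count x : Int) + if x = c then run + 1 else 0))
            = t.dedup.map (fun x => (((c :: t).count x : Int) + if x = c then run else 0)) := by
          apply List.map_congr_left
          intro x _
          by_cases hx : x = c
          · subst hx; rw [List.count_cons_self, if_pos rfl, if_pos rfl]; push_cast; ring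
          · rw [List.count_cons_of_ne (Ne.symm hx), if_neg hx, if_neg hx]
        rw [hmap]
        apply foldl_max_absorb _ _ _ _ c (List.mem_dedup.2 hc)
        show run + 1 ≤ ((c :: t).count c : Int) + if c = c then run else 0
        have h1 : (1 : Int) ≤ ((c :: t).count c : Int) := by
          exact_mod_cast List.one_le_count_iff.2 List.mem_cons_self
        rw [if_pos rfl]; omega
      · rw [List.dedup_cons_of_notMem hc, List.map_cons, List.foldl_cons]
        have hfc : (((c :: t).count c : Int) + if c = c then run else 0) = run + 1 := by
          rw [List.count_cons_self, List.count_eq_zero_of_not_mem hc, if_pos rfl]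
          push_cast; ring
        rw [hfc]
        apply congrArg (fun L => List.foldl max (max len (run + 1)) L)
        apply List.map_congr_left
        intro x hx
        have hxc : x ≠ c := fun h => hc (h ▸ List.mem_dedup.1 hx)
        rw [List.count_cons_of_ne (Ne.symm hxc), if_neg hxc, if_neg hxc]
    · have hpc : p < c := lt_of_le_of_ne (hle c List.mem_cons_self) (Ne.symm hcp)
      have hstep : lusRunStep (len, run, some p) c = (max len 1, 1, some c) := by
        have hne : (some p = some c) = False := by simp [Ne.symm hcp]
        simp only [lusRunStep, hne, if_false]
        rw [max_def]; split_ifs <;> simp <;> omega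
      rw [List.foldl_cons, hstep,
        ih hpw' (max len 1) 1 c hhead (le_max_right _ _)]
      have hpnot : ∀ x, x ∈ (c :: t) → x ≠ p := by
        intro x hx
        rcases List.mem_cons.1 hx with rfl | hx
        · exact Ne.symm (ne_of_lt hpc)
        · exact fun h => absurd (lt_of_lt_of_le hpc (hhead x hx)) (h ▸ lt_irrefl p)
      by_cases hc : c ∈ t
      · rw [List.dedup_cons_of_mem hc]
        have hmap : t.dedup.map (fun x => ((t.count x : Int) + if x = c then 1 else 0))
            = t.dedup.map (fun x => (((c :: t).count x : Int) + if x = p then run else 0)) := by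
          apply List.map_congr_left
          intro x hx
          have hxp : x ≠ p := hpnot x (List.mem_cons_of_mem c (List.mem_dedup.1 hx))
          by_cases hxc : x = c
          · subst hxc; rw [List.count_cons_self, if_pos rfl, if_neg hxp]; push_cast; ring
          · rw [List.count_cons_of_ne (Ne.symm hxc), if_neg hxc, if_neg hxp]
        rw [hmap]
        apply foldl_max_absorb _ _ _ _ c (List.mem_dedup.2 hc)
        show (1 : Int) ≤ ((c :: t).count c : Int) + if c = p then run else 0
        have h1 : (1 : Int) ≤ ((c :: t).count c : Int) := by
          exact_mod_cast List.one_le_count_iff.2 List.mem_cons_self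
        rw [if_neg hcp]; omega
      · rw [List.dedup_cons_of_notMem hc, List.map_cons, List.foldl_cons]
        have hfc : (((c :: t).count c : Int) + if c = p then run else 0) = 1 := by
          rw [List.count_cons_self, List.count_eq_zero_of_not_mem hc, if_neg hcp]
          push_cast
        rw [hfc]
        apply congrArg (fun L => List.foldl max (max len 1) L)
        apply List.map_congr_left
        intro x hx
        have hxc : x ≠ c := fun h => hc (h ▸ List.mem_dedup.1 hx)
        have hxp : x ≠ p := hpnot x (List.mem_cons_of_mem c (List.mem_dedup.1 hx))
        rw [List.count_cons_of_ne (Ne.symm hxc), if_neg hxc, if_neg hxp]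

-- B's scan over a sorted list computes the fold of max over the counts of the distinct characters.
lemma run_all (l : List Char) (hl : l.Pairwise (· ≤ ·)) :
    (l.foldl lusRunStep (0, 0, none)).1
      = (l.dedup.map (fun c => (l.count c : Int))).foldl max 0 := by
  cases l with
  | nil => rfl
  | cons c t =>
    have hpw' : t.Pairwise (· ≤ ·) := (List.pairwise_cons.1 hl).2
    have hhead : ∀ x ∈ t, c ≤ x := (List.pairwise_cons.1 hl).1
    have hstep : lusRunStep (0, 0, none) c = ((1 : Int), (1 : Int), some c) := by
      simp [lusRunStep]
    rw [List.foldl_cons, hstep,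
      run_main t hpw' 1 1 c hhead (le_refl 1)]
    by_cases hc : c ∈ t
    · rw [List.dedup_cons_of_mem hc]
      have hmap : t.dedup.map (fun x => ((t.count x : Int) + if x = c then 1 else 0))
          = t.dedup.map (fun x => (((c :: t).count x : Int))) := by
        apply List.map_congr_left
        intro x _
        by_cases hxc : x = c
        · subst hxc; rw [List.count_cons_self, if_pos rfl]; push_cast; ring
        · rw [List.count_cons_of_ne (Ne.symm hxc), if_neg hxc]; ring
      rw [hmap, show (1 : Int) = max 0 1 by rfl]
      apply foldl_max_absorb _ _ _ _ c (List.mem_dedup.2 hc)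
      show (1 : Int) ≤ ((c :: t).count c : Int)
      exact_mod_cast List.one_le_count_iff.2 List.mem_cons_self
    · rw [List.dedup_cons_of_notMem hc, List.map_cons, List.foldl_cons]
      have hfc : ((c :: t).count c : Int) = 1 := by
        rw [List.count_cons_self, List.count_eq_zero_of_not_mem hc]; push_cast
      rw [hfc, show max (0 : Int) 1 = 1 by rfl]
      apply congrArg (fun L => List.foldl max (1 : Int) L)
      apply List.map_congr_left
      intro x hx
      have hxc : x ≠ c := fun h => hc (h ▸ List.mem_dedup.1 hx)
      rw [List.count_cons_of_ne (Ne.symm hxc), if_neg hxc]; ring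

-- bridge: foldl max over a permutation
lemma foldl_max_perm {l₁ l₂ : List Int} (h : l₁.Perm l₂) (a : Int) :
    l₁.foldl max a = l₂.foldl max a := by
  induction h generalizing a with
  | nil => rfl
  | cons x _ ih => simp only [List.foldl_cons]; exact ih _
  | swap x y l =>
    simp only [List.foldl_cons]
    rw [max_right_comm]
  | trans _ _ ih₁ ih₂ => exact (ih₁ a).trans (ih₂ a)

lemma portB_eq_max_set_counts (s : String) :
    longest_uniform_substring_alt s
      = ((PySem.Set.ofList s.toList).map (fun k => (s.toList.count k : Int))).foldl max 0 := by
  unfold longest_uniform_substring_alt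
  set t := PySem.List.sorted s.toList (fun c => c) false with ht
  have hperm : t.Perm s.toList := PySem.List.sorted_perm _ _ _
  have hpw : t.Pairwise (· ≤ ·) := PySem.List.sorted_pairwise _ _
  rw [run_all t hpw]
  have hcnt : (t.dedup.map (fun c => (t.count c : Int)))
      = (t.dedup.map (fun c => (s.toList.count c : Int))) := by
    apply List.map_congr_left
    intro c _
    rw [hperm.count_eq]
  rw [hcnt]
  have hdperm : (t.dedup).Perm (PySem.Set.ofList s.toList) := by
    rw [List.perm_ext_iff_of_nodup t.nodup_dedup (PySem.Set.nodup_ofList _)]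
    intro a
    rw [List.mem_dedup, PySem.Set.mem_ofList, hperm.mem_iff]
  exact foldl_max_perm (hdperm.map _) 0

-- ===== VERDICT (by name: the statement is the Claim_ definition above) =====
theorem longest_uniform_substring_spec : Claim_equal_longest_uniform_substring := by
  intro s _
  show longest_uniform_substring s = longest_uniform_substring_alt s
  rw [portA_eq_max_set_counts, portB_eq_max_set_counts]
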